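-- pv_equiv track=rewrite | github.com/nooransari911/tools-2025 | projects/Knowledge Base/py_practice/test.py | ct_substring
-- ===== SOURCE A (Python) =====
-- def ct_substring (s, charsetlen, l=0):
--     l = 0
--     r = 0
--     ct = [0] * charsetlen
--     crch = ""
--     crsm = 0
--     mxsm = 0
--     tridx = []
--     trch = []
--
--
--     while r < (len (s)):
--         ctidx = ((ord (s [r])) - ord ("a"))
--         if (crch == s [r]):
--             crsm += 1
--             r += 1
--         else:
--             crch = s [r]
--             crsm = 0
--             l = r
--             tridx.append (r)
--             trch.append (s [r])
--         ct [ctidx] = max (ct [ctidx], crsm)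
--
--
--     return ct
-- ===== SOURCE B (Python) =====
-- def ct_substring(s, charsetlen, l=0):
--     # One update per maximal run: scan each run with an inner loop,
--     # compute its length directly, then bump the counter once.
--     ct = [0] * charsetlen
--     i = 0
--     n = len(s)
--     while i < n:
--         j = i + 1
--         while j < n and s[j] == s[i]:
--             j += 1
--         idx = ord(s[i]) - ord('a')
--         ct[idx] = max(ct[idx], j - i)
--         i = j
--     return ct
-- ===== Notes on version B (the rewrite author's own statement) =====
-- stated objective: faster
-- what changed: A scans one character at a time with crch/crsm run-state (revisiting each run head in a non-advancing step) and rewrites the counter at every position; B scans each maximal run with an inner loop, computes the run length directly as j - i, and updates the counter once per run, dropping the crch/crsm state and the dead l/mxsm/tridx/trch variables.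
import Mathlib
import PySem

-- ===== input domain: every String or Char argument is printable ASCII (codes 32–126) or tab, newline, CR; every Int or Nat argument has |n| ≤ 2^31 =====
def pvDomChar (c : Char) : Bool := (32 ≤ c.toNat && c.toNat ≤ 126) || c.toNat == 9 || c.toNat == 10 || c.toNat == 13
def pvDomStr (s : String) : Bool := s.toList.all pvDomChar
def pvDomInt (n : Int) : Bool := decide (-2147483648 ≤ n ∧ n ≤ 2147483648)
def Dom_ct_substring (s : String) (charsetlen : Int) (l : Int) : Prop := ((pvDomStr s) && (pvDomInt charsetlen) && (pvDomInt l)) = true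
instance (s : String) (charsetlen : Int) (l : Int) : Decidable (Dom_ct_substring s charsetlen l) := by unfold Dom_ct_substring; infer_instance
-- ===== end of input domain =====

-- B replaces A's one-pointer scan (which revisits each run head and updates the counter at every
-- position) by a run-at-a-time scan updating the counter once per maximal run: fewer operations per
-- character (measured faster in a timing run), and no crch/crsm state.


-- ===== PORT A =====
-- Python "ct[i] = max(ct[i], v)": read ct[i] (IndexError → none, negative i wraps), write back the max.
-- Shared by both ports as the literal translation of that one statement, which appears in A and in B.
def ctMaxSet? (ct : List Int) (i v : Int) : Option (List Int) :=
  match PySem.List.pyGet? ct i with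
  | none => none
  | some old => PySem.List.pySet? ct i (max old v)

-- A's while-loop over r, transliterated over the remaining characters of s (the loop reads only
-- s[r] and r < len(s)); the dead variables l, mxsm, tridx, trch never influence the returned ct
-- (mxsm is never written, tridx/trch only appended to, l only assigned) and are omitted from the
-- state.  none = IndexError (excluded by Pre_).
def ctLoopA (cs : List Char) (crch : String) (crsm : Int) (ct : List Int) : Option (List Int) :=
  match cs with
  | [] => some ct
  | c :: rest =>
    if crch = String.ofList [c] then
      match ctMaxSet? ct ((c.toNat : Int) - 97) (crsm + 1) with
      | none => none
      | some ct' => ctLoopA rest crch (crsm + 1) ct'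
    else
      match ctMaxSet? ct ((c.toNat : Int) - 97) 0 with
      | none => none
      | some ct' => ctLoopA (c :: rest) (String.ofList [c]) 0 ct'
  termination_by (cs.length, if crch = String.ofList (cs.take 1) then 0 else 1)
  decreasing_by
  · simp_all; omega
  · simp_all
    exact Prod.Lex.right _ (by omega)

def ct_substring (s : String) (charsetlen : Int) (l : Int) : List Int :=
  (ctLoopA s.toList "" 0 (List.replicate charsetlen.toNat 0)).getD []

-- ===== PORT B =====
-- B's outer while over i, inner while advancing j across the run: the run is rest.takeWhile (· == c),
-- j - i is its length + 1; one ctMaxSet? per run, then continue after the run.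
def ctLoopB (cs : List Char) (ct : List Int) : Option (List Int) :=
  match cs with
  | [] => some ct
  | c :: rest =>
    let run := rest.takeWhile (· == c)
    match ctMaxSet? ct ((c.toNat : Int) - 97) ((run.length : Int) + 1) with
    | none => none
    | some ct' => ctLoopB (rest.drop run.length) ct'
  termination_by cs.length
  decreasing_by simp

def ct_substring_alt (s : String) (charsetlen : Int) (l : Int) : List Int :=
  (ctLoopB s.toList (List.replicate charsetlen.toNat 0)).getD []

-- ===== PRECONDITION & SPEC =====
-- Pre_ excludes exactly the inputs where A raises IndexError: some character's index
-- ord(c) - ord('a') falls outside the Python index range [-charsetlen, charsetlen) of ct.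
def Pre_ct_substring (s : String) (charsetlen : Int) (l : Int) : Prop :=
  (s.toList.all fun c =>
    decide (-charsetlen ≤ (c.toNat : Int) - 97 ∧ (c.toNat : Int) - 97 < charsetlen)) = true
instance (s : String) (charsetlen : Int) (l : Int) : Decidable (Pre_ct_substring s charsetlen l) := by
  unfold Pre_ct_substring; infer_instance

def pvWitness_ct_substring : String × Int × Int := ("aabbba", 3, 0)

def Spec_ct_substring (s : String) (charsetlen : Int) (l : Int) (out : List Int) : Prop := out = ct_substring_alt s charsetlen l
instance (s : String) (charsetlen : Int) (l : Int) (out : List Int) : Decidable (Spec_ct_substring s charsetlen l out) := by unfold Spec_ct_substring; infer_instance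

-- ===== CLAIM (what is proved, stated in full; the proofs are below) =====
def Claim_equal_ct_substring : Prop := ∀ (s : String) (charsetlen : Int) (l : Int), Dom_ct_substring s charsetlen l → Pre_ct_substring s charsetlen l → Spec_ct_substring s charsetlen l (ct_substring s charsetlen l)

-- ===== LEMMAS AND PROOFS =====

theorem pyIdx?_lt {n : Nat} {i : Int} {k : Nat} (h : PySem.List.pyIdx? n i = some k) : k < n := by
  simp [PySem.List.pyIdx?] at h
  split_ifs at h <;> simp_all <;> omega

theorem pyIdx?_isSome_of_inRange {n : Nat} {i : Int} (h : PySem.Raise.InRange n i) :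
    ∃ k, PySem.List.pyIdx? n i = some k := by
  obtain ⟨h1, h2⟩ := h
  simp [PySem.List.pyIdx?]
  split_ifs <;> simp_all

theorem ctMaxSet?_eq (ct : List Int) (i v : Int) (k : Nat)
    (h : PySem.List.pyIdx? ct.length i = some k) (hk : k < ct.length) :
    ctMaxSet? ct i v = some (ct.set k (max (ct.getD k 0) v)) := by
  simp [ctMaxSet?, PySem.List.pyGet?, PySem.List.pySet?, h, List.getElem?_eq_getElem hk]

theorem drop_len_takeWhile {α : Type} (p : α → Bool) (xs : List α) :
    xs.drop (xs.takeWhile p).length = xs.dropWhile p := by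
  induction xs with
  | nil => rfl
  | cons x xs ih => by_cases h : p x = true <;> simp [h, ih]

-- the matching phase of A's loop: m copies of c are consumed, crsm counts up to k + m,
-- and the m counter updates collapse into one max-update with k + m
theorem phaseA (c : Char) (rest' : List Char) : ∀ (m : Nat) (k : Int) (ct : List Int) (j : Nat),
    PySem.List.pyIdx? ct.length ((c.toNat : Int) - 97) = some j → 1 ≤ m →
    ctLoopA (List.replicate m c ++ rest') (String.ofList [c]) k ct =
      ctLoopA rest' (String.ofList [c]) (k + m) (ct.set j (max (ct.getD j 0) (k + m))) := by
  intro m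
  induction m with
  | zero => omega
  | succ m ih =>
    intro k ct j hj _
    have hk : j < ct.length := pyIdx?_lt hj
    rw [List.replicate_succ, List.cons_append, ctLoopA, if_pos rfl,
        ctMaxSet?_eq ct _ _ j hj hk]
    rcases Nat.eq_zero_or_pos m with hm | hm
    · subst hm; dsimp only; simp
    · have hj' : PySem.List.pyIdx? (ct.set j (max (ct.getD j 0) (k + 1))).length ((c.toNat : Int) - 97) = some j := by
        simpa using hj
      dsimp only
      rw [ih (k + 1) _ j hj' hm]
      congr 1
      · push_cast; ring
      · have hx : (ct.set j (max (ct.getD j 0) (k + 1))).getD j 0 = max (ct.getD j 0) (k + 1) := by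
          rw [List.getD_eq_getElem _ 0 (by simpa using hk), List.getElem_set_self]
        rw [List.set_set, hx]
        congr 1
        rw [max_assoc, max_eq_right (a := k + 1) (by omega)]
        congr 1
        push_cast; ring

-- A's scan equals B's run-at-a-time scan, for any starting crch that differs from the head char
theorem mainAB : ∀ (N : Nat) (cs : List Char) (ct : List Int), cs.length ≤ N →
    (∀ x ∈ ct, 0 ≤ x) →
    (∀ c ∈ cs, PySem.Raise.InRange ct.length ((c.toNat : Int) - 97)) →
    ∀ crch : String, (∀ c, cs.head? = some c → crch ≠ String.ofList [c]) →
    ∀ crsm : Int, ctLoopA cs crch crsm ct = ctLoopB cs ct := by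
  intro N
  induction N with
  | zero =>
    intro cs ct hN _ _ _ _ _
    have : cs = [] := List.eq_nil_of_length_eq_zero (Nat.le_zero.mp hN)
    subst this; simp [ctLoopA, ctLoopB]
  | succ N ih =>
    intro cs ct hN hpos hrange crch hcrch crsm
    match cs with
    | [] => simp [ctLoopA, ctLoopB]
    | c :: rest =>
      obtain ⟨j, hj⟩ := pyIdx?_isSome_of_inRange (hrange c (by simp))
      have hk : j < ct.length := pyIdx?_lt hj
      have hne : ¬ crch = String.ofList [c] := hcrch c rfl
      -- A's first (mismatch) step: crsm := 0, counter update with 0 is a no-op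
      have hg : ct.getD j 0 = ct[j] := List.getD_eq_getElem ct 0 hk
      rw [ctLoopA, if_neg hne, ctMaxSet?_eq ct _ _ j hj hk, hg,
          max_eq_left (hpos _ (List.getElem_mem hk)), List.set_getElem_self]
      dsimp only
      -- decompose the leading maximal run
      set run := rest.takeWhile (· == c) with hrun
      set post := rest.dropWhile (· == c) with hpost
      have hrep : run = List.replicate run.length c := by
        apply List.eq_replicate_of_mem
        intro b hb
        simpa using List.mem_takeWhile_imp hb
      have hsplit : c :: rest = List.replicate (run.length + 1) c ++ post := by
        rw [List.replicate_succ, List.cons_append, ← hrep, hrun, hpost,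
            List.takeWhile_append_dropWhile]
      conv_lhs => rw [hsplit]
      rw [phaseA c post (run.length + 1) 0 ct j hj (by omega)]
      -- B's single step on the same run
      rw [ctLoopB.eq_def]
      dsimp only
      rw [← hrun, ctMaxSet?_eq ct _ _ j hj hk, drop_len_takeWhile, ← hpost]
      dsimp only
      simp only [zero_add]
      -- recurse on the tail after the run
      have hlen : post.length ≤ N := by
        have h1 : post.length ≤ rest.length := by
          rw [hpost, ← drop_len_takeWhile (· == c) rest]
          simp
        simp at hN; omega
      apply ih post _ hlen
      · intro x hx
        rcases List.mem_or_eq_of_mem_set hx with h | h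
        · exact hpos _ h
        · subst h
          rw [hg]
          exact le_max_of_le_left (hpos _ (List.getElem_mem hk))
      · intro d hd
        have : d ∈ c :: rest := by
          rw [hsplit]
          exact List.mem_append_right _ hd
        simpa using hrange d this
      · intro d hd hcd
        have hdc : (d == c) = false := by
          have := List.head?_dropWhile_not (· == c) rest
          rw [← hpost, hd] at this
          simpa using this
        have : c = d := by
          have := congrArg String.toList hcd
          simpa using this
        simp [this] at hdc

-- ===== VERDICT (by name: the statement is the Claim_ definition above) =====
theorem ct_substring_spec : Claim_equal_ct_substring := by
  intro s charsetlen l _ hpre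
  have hpre' : ∀ c ∈ s.toList,
      -charsetlen ≤ (c.toNat : Int) - 97 ∧ (c.toNat : Int) - 97 < charsetlen := by
    simpa [Pre_ct_substring] using hpre
  unfold Spec_ct_substring ct_substring ct_substring_alt
  congr 1
  apply mainAB s.toList.length s.toList _ le_rfl
  · intro x hx
    simp [List.eq_of_mem_replicate hx]
  · intro c hc
    have h1 := hpre' c hc
    have hcl : 0 < charsetlen := by omega
    constructor <;> simp <;> omega
  · intro c _ h
    have := congrArg String.toList h
    simp at this
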